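-- pv_equiv track=rewrite | github.com/Lockszmith-Forks4PR/repolib_fork4pr | repolib/util.py | compare_sources
-- ===== SOURCE A (Python) =====
-- def compare_sources(source1, source2, excl_keys:list) -> bool:
--     """Compare two sources based on arbitrary criteria.
--
--     This looks at a given list of keys, and if the given keys between the two
--     given sources are identical, returns True.
--
--     Arguments:
--         source1, source2(Source): The two sources to compare
--         excl_keys([str]): Any keys to exclude from the comparison
--
--     Returns: bool
--         `True` if the sources are identical, otherwise `False`.
--     """
--     for key in source1:
--         if key in excl_keys:
--             continue
--         if key in source2:
--             if source1[key] != source2[key]: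
--                 return False
--             else:
--                 continue
--         else:
--             return False
--     for key in source2:
--         if key in excl_keys:
--             continue
--         if key in source1:
--             if source1[key] != source2[key]:
--                 return False
--             else:
--                 continue
--         else:
--             return False
--     return True
-- ===== SOURCE B (Python) =====
-- def compare_sources(source1, source2, excl_keys: list) -> bool:
--     excl = set(excl_keys)
--     d1 = {k: v for k, v in source1.items() if k not in excl}
--     d2 = {k: v for k, v in source2.items() if k not in excl}
--     return d1 == d2
-- ===== Notes on version B (the rewrite author's own statement) =====
-- stated objective: simpler
-- what changed: Replaces A's two element-by-element scan loops with early returns by building the two key-filtered dicts once and comparing them with a single whole-dict equality; Pre_ only excludes association lists with duplicate keys, which do not encode any Python dict.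
import Mathlib
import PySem

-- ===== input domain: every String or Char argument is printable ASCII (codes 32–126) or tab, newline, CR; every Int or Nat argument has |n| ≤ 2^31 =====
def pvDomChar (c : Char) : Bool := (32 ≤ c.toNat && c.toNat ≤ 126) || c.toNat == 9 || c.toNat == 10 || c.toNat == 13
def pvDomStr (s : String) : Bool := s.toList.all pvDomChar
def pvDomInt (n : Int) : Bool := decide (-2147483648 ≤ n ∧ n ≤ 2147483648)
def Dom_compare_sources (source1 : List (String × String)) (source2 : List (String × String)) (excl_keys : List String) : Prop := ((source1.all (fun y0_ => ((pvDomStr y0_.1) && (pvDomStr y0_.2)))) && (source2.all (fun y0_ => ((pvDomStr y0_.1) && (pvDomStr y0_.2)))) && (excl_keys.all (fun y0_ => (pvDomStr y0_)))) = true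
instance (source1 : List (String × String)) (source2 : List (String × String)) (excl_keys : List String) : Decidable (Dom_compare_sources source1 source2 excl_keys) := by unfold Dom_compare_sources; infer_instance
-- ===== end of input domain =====

-- B builds the two key-filtered dicts once and compares them with one whole-dict equality
-- instead of A's two element-by-element scan loops with early returns (objective: simpler).

-- first-match lookup in an association list (= dict lookup under unique keys)
def pvLookup? (l : List (String × String)) (k : String) : Option String :=
  (l.find? (fun p => p.1 == k)).map Prod.snd

-- ===== PORT A =====
-- one of A's two loops: iterate the keys, skip excluded ones, demand membership in
-- `other`'s keys and equal values, returning False early otherwise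
def pvLoop (source1 source2 : List (String × String)) (excl_keys : List String)
    (other : List (String × String)) : List String → Bool
  | [] => true
  | k :: rest =>
    if excl_keys.contains k then pvLoop source1 source2 excl_keys other rest
    else if (other.map Prod.fst).contains k then
      if pvLookup? source1 k != pvLookup? source2 k then false
      else pvLoop source1 source2 excl_keys other rest
    else false

def compare_sources (source1 : List (String × String)) (source2 : List (String × String)) (excl_keys : List String) : Bool :=
  pvLoop source1 source2 excl_keys source2 (source1.map Prod.fst) &&
  pvLoop source1 source2 excl_keys source1 (source2.map Prod.fst)

-- ===== PORT B =====
-- Python dict == : every item of each dict is looked up with the same value in the other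
def pvDictEq (d1 d2 : List (String × String)) : Bool :=
  d1.all (fun p => pvLookup? d2 p.1 == some p.2) &&
  d2.all (fun p => pvLookup? d1 p.1 == some p.2)

def compare_sources_alt (source1 : List (String × String)) (source2 : List (String × String)) (excl_keys : List String) : Bool :=
  pvDictEq (source1.filter (fun p => !(PySem.Set.ofList excl_keys : PySem.Set String).contains p.1))
           (source2.filter (fun p => !(PySem.Set.ofList excl_keys : PySem.Set String).contains p.1))

-- ===== PRECONDITION & SPEC =====
-- Pre_ excludes association lists with duplicate keys: they do not encode a Python dict
-- (constructing the dict collapses them), so the list encoding is ambiguous there.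
def Pre_compare_sources (source1 : List (String × String)) (source2 : List (String × String)) (excl_keys : List String) : Prop :=
  (source1.map Prod.fst).Nodup ∧ (source2.map Prod.fst).Nodup
instance (source1 : List (String × String)) (source2 : List (String × String)) (excl_keys : List String) : Decidable (Pre_compare_sources source1 source2 excl_keys) := by unfold Pre_compare_sources; infer_instance
def pvWitness_compare_sources : (List (String × String)) × (List (String × String)) × List String :=
  ([("a", "1")], [("a", "1")], ["b"])

def Spec_compare_sources (source1 : List (String × String)) (source2 : List (String × String)) (excl_keys : List String) (out : Bool) : Prop := out = compare_sources_alt source1 source2 excl_keys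
instance (source1 : List (String × String)) (source2 : List (String × String)) (excl_keys : List String) (out : Bool) : Decidable (Spec_compare_sources source1 source2 excl_keys out) := by unfold Spec_compare_sources; infer_instance

-- ===== CLAIM (what is proved, stated in full; the proofs are below) =====
def Claim_equal_compare_sources : Prop := ∀ (source1 : List (String × String)) (source2 : List (String × String)) (excl_keys : List String), Dom_compare_sources source1 source2 excl_keys → Pre_compare_sources source1 source2 excl_keys → Spec_compare_sources source1 source2 excl_keys (compare_sources source1 source2 excl_keys)

-- ===== LEMMAS AND PROOFS =====

-- A's loop is the `all` of its per-key condition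
theorem pvLoop_eq_all (s1 s2 : List (String × String)) (excl : List String)
    (other : List (String × String)) (keys : List String) :
    pvLoop s1 s2 excl other keys
      = keys.all (fun k => excl.contains k ||
          ((other.map Prod.fst).contains k && (pvLookup? s1 k == pvLookup? s2 k))) := by
  induction keys with
  | nil => rfl
  | cons k rest ih =>
    by_cases h1 : k ∈ excl <;> by_cases h2 : k ∈ other.map Prod.fst <;>
      by_cases h3 : pvLookup? s1 k = pvLookup? s2 k <;>
      simp [pvLoop, ih, h1, h2, h3, bne]

-- under unique keys, membership determines the lookup
theorem pvLookup_of_mem {l : List (String × String)} {k v : String}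
    (hnd : (l.map Prod.fst).Nodup) (hm : (k, v) ∈ l) : pvLookup? l k = some v := by
  induction l with
  | nil => simp at hm
  | cons p rest ih =>
    simp only [List.map_cons, List.nodup_cons] at hnd
    rcases List.mem_cons.mp hm with h | h
    · cases h
      simp [pvLookup?, List.find?_cons_of_pos]
    · have hne2 : (p.1 == k) = false := by
        simp only [beq_eq_false_iff_ne]
        intro he
        exact hnd.1 (he ▸ List.mem_map.mpr ⟨(k, v), h, rfl⟩)
      simp only [pvLookup?, List.find?_cons, hne2]
      exact ih hnd.2 h

-- a successful lookup means the key is present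
theorem pvLookup_contains {l : List (String × String)} {k v : String}
    (h : pvLookup? l k = some v) : (l.map Prod.fst).contains k = true := by
  simp only [pvLookup?, Option.map_eq_some_iff] at h
  obtain ⟨p, hp, hv⟩ := h
  have hk : p.1 = k := by simpa using List.find?_some hp
  simp only [List.contains_eq_mem, decide_eq_true_iff]
  exact List.mem_map.mpr ⟨p, List.mem_of_find?_eq_some hp, hk⟩

-- filtering out excluded keys does not change the lookup of a non-excluded key
theorem pvLookup_filter (l : List (String × String)) (excl : List String) {k : String}
    (h : k ∉ excl) :
    pvLookup? (l.filter (fun p => !excl.contains p.1)) k = pvLookup? l k := by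
  induction l with
  | nil => rfl
  | cons p rest ih =>
    rw [List.filter_cons]
    by_cases hp : p.1 ∈ excl
    · have hcond : (!excl.contains p.1) = false := by simp [hp]
      rw [hcond, if_neg (by simp)]
      have hne2 : (p.1 == k) = false := by
        simp only [beq_eq_false_iff_ne]
        intro he
        exact h (he ▸ hp)
      simp only [pvLookup?, List.find?_cons, hne2]
      exact ih
    · have hcond : (!excl.contains p.1) = true := by simp [hp]
      rw [hcond, if_pos rfl]
      cases he : (p.1 == k) <;>
        simp [pvLookup?, he] at ih ⊢
      exact ih

-- pointwise-equal predicates give equal `all`s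
theorem pv_all_congr {α : Type} (l : List α) (f g : α → Bool)
    (h : ∀ x ∈ l, f x = g x) : l.all f = l.all g := by
  induction l with
  | nil => rfl
  | cons x xs ih =>
    simp only [List.all_cons, h x (List.mem_cons_self), ih (fun y hy => h y (List.mem_cons_of_mem x hy))]

-- one loop of A equals the corresponding `all` of B over the filtered list
theorem pv_side_eq (s1 s2 : List (String × String)) (excl : List String)
    (h1 : (s1.map Prod.fst).Nodup) :
    pvLoop s1 s2 excl s2 (s1.map Prod.fst)
      = (s1.filter (fun p => !excl.contains p.1)).all
          (fun p => pvLookup? (s2.filter (fun q => !excl.contains q.1)) p.1 == some p.2) := by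
  rw [pvLoop_eq_all, List.all_map, List.all_filter]
  apply pv_all_congr
  intro p hp
  by_cases he : p.1 ∈ excl
  · simp [Function.comp, he]
  · have hl1 : pvLookup? s1 p.1 = some p.2 := pvLookup_of_mem h1 hp
    rw [Function.comp_apply, pvLookup_filter s2 excl he]
    by_cases h2 : pvLookup? s2 p.1 = some p.2
    · have hex : ∃ x, (p.1, x) ∈ s2 := by
        have hm2 : p.1 ∈ s2.map Prod.fst := by simpa using pvLookup_contains h2
        obtain ⟨q, hq, hf⟩ := List.mem_map.mp hm2
        exact ⟨q.2, by rw [← hf]; simpa using hq⟩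
      simp [he, hl1, h2, hex]
    · have hb1 : (some p.2 == pvLookup? s2 p.1) = false := by
        rw [beq_eq_false_iff_ne]; exact fun hh => h2 hh.symm
      have hb2 : (pvLookup? s2 p.1 == some p.2) = false := by
        rw [beq_eq_false_iff_ne]; exact h2
      simp [he, hl1, hb1, hb2]

-- the second loop, symmetrically (s2's keys, membership in s1)
theorem pv_side_eq2 (s1 s2 : List (String × String)) (excl : List String)
    (h2 : (s2.map Prod.fst).Nodup) :
    pvLoop s1 s2 excl s1 (s2.map Prod.fst)
      = (s2.filter (fun p => !excl.contains p.1)).all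
          (fun p => pvLookup? (s1.filter (fun q => !excl.contains q.1)) p.1 == some p.2) := by
  rw [pvLoop_eq_all, List.all_map, List.all_filter]
  apply pv_all_congr
  intro p hp
  by_cases he : p.1 ∈ excl
  · simp [Function.comp, he]
  · have hl2 : pvLookup? s2 p.1 = some p.2 := pvLookup_of_mem h2 hp
    rw [Function.comp_apply, pvLookup_filter s1 excl he]
    by_cases h1 : pvLookup? s1 p.1 = some p.2
    · have hex : ∃ x, (p.1, x) ∈ s1 := by
        have hm1 : p.1 ∈ s1.map Prod.fst := by simpa using pvLookup_contains h1
        obtain ⟨q, hq, hf⟩ := List.mem_map.mp hm1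
        exact ⟨q.2, by rw [← hf]; simpa using hq⟩
      simp [he, hl2, h1, hex]
    · have hb1 : (pvLookup? s1 p.1 == some p.2) = false := by
        rw [beq_eq_false_iff_ne]; exact h1
      have hb2 : (pvLookup? s1 p.1 == pvLookup? s2 p.1) = false := by
        rw [hl2, beq_eq_false_iff_ne]; exact h1
      simp [he, hb1, hb2]

-- filtering against the dedup set is filtering against the list
theorem pv_filter_set (l : List (String × String)) (excl : List String) :
    l.filter (fun p => !(PySem.Set.ofList excl : PySem.Set String).contains p.1)
      = l.filter (fun p => !excl.contains p.1) := by
  apply List.filter_congr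
  intro p _
  simp [List.contains_eq_mem, PySem.Set.mem_ofList]

-- ===== VERDICT (by name: the statement is the Claim_ definition above) =====
theorem compare_sources_spec : Claim_equal_compare_sources := by
  intro s1 s2 excl _ hpre
  unfold Spec_compare_sources compare_sources compare_sources_alt pvDictEq
  rw [pv_filter_set s1 excl, pv_filter_set s2 excl,
    pv_side_eq s1 s2 excl hpre.1, pv_side_eq2 s1 s2 excl hpre.2]
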